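-- pv_equiv track=rewrite | github.com/SurinSeong/algorithm | solving-club/review/11092.py | min_max_index_gap
-- ===== SOURCE A (Python) =====
-- def min_max_index_gap(arr, n):
--     min_idx, max_idx = 0, 0
--     for i in range(1, n):
--         if arr[max_idx] <= arr[i]:
--             max_idx = i
--
--         if arr[min_idx] > arr[i]:
--             min_idx = i
--
--     return max_idx - min_idx
-- ===== SOURCE B (Python) =====
-- def min_max_index_gap(arr, n):
--     if n <= 1:
--         return 0
--     prefix = [arr[i] for i in range(n)]
--     mx = max(prefix)
--     mn = min(prefix)
--     max_idx = n - 1 - prefix[::-1].index(mx)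
--     min_idx = prefix.index(mn)
--     return max_idx - min_idx
-- ===== Notes on version B (the rewrite author's own statement) =====
-- stated objective: idiomatic
-- what changed: Replaces the single index-tracking loop by a value-based computation: materialise the first n elements with arr[i] (so IndexError is preserved), compute max/min with the built-ins, then locate the last occurrence of the max (via the reversed prefix) and the first occurrence of the min with list.index.
import Mathlib
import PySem

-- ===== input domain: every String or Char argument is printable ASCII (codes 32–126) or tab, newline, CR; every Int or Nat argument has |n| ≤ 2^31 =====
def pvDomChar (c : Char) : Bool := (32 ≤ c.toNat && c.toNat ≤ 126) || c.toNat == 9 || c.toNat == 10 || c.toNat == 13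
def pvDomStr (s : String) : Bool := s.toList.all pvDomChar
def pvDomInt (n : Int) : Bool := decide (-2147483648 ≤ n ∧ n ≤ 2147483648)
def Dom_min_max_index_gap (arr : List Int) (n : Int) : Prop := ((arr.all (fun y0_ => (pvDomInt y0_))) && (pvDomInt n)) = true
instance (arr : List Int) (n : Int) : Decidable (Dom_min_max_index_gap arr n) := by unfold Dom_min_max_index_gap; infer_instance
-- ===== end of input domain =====

-- B replaces A's index-tracking loop by a value-based computation (materialise the first n elements,
-- take max/min with the built-ins, then last occurrence of the max and first occurrence of the min);
-- same O(n) cost, no speed claim.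


-- ===== PORT A =====
-- the loop body: state is (min_idx, max_idx); both tests read the state before this iteration, as in A
def pvStepA (arr : List Int) (st : Int × Int) (i : Int) : Int × Int :=
  (if PySem.List.pyGetD arr st.1 0 > PySem.List.pyGetD arr i 0 then i else st.1,
   if PySem.List.pyGetD arr st.2 0 ≤ PySem.List.pyGetD arr i 0 then i else st.2)

def min_max_index_gap (arr : List Int) (n : Int) : Int :=
  let st := (PySem.List.pyRange 1 n 1).foldl (pvStepA arr) (0, 0)
  st.2 - st.1

-- ===== PORT B =====
def min_max_index_gap_alt (arr : List Int) (n : Int) : Int :=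
  if n ≤ 1 then 0
  else
    -- prefix = [arr[i] for i in range(n)]; arr[i] raises for i ≥ len(arr), which Pre_ excludes
    let pfx := (PySem.List.pyRange 0 n 1).map (fun i => PySem.List.pyGetD arr i 0)
    match PySem.List.max? pfx (fun x => x), PySem.List.min? pfx (fun x => x) with
    | some mx, some mn =>
        let max_idx : Int := n - 1 - ((PySem.List.index? pfx.reverse mx).getD 0 : Nat)
        let min_idx : Int := ((PySem.List.index? pfx mn).getD 0 : Nat)
        max_idx - min_idx
    | _, _ => 0        -- unreachable: n ≥ 2 makes pfx nonempty

-- ===== PRECONDITION & SPEC =====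
-- Pre_ excludes exactly the inputs where both A and B raise IndexError: n ≥ 2 with fewer than n elements.
def Pre_min_max_index_gap (arr : List Int) (n : Int) : Prop := n ≤ 1 ∨ n ≤ (arr.length : Int)
instance (arr : List Int) (n : Int) : Decidable (Pre_min_max_index_gap arr n) := by
  unfold Pre_min_max_index_gap; infer_instance
def pvWitness_min_max_index_gap : List Int × Int := ([1, 3, 2], 3)

def Spec_min_max_index_gap (arr : List Int) (n : Int) (out : Int) : Prop := out = min_max_index_gap_alt arr n
instance (arr : List Int) (n : Int) (out : Int) : Decidable (Spec_min_max_index_gap arr n out) := by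
  unfold Spec_min_max_index_gap; infer_instance

-- ===== CLAIM (what is proved, stated in full; the proofs are below) =====
def Claim_equal_min_max_index_gap : Prop := ∀ (arr : List Int) (n : Int), Dom_min_max_index_gap arr n → Pre_min_max_index_gap arr n → Spec_min_max_index_gap arr n (min_max_index_gap arr n)

-- ===== LEMMAS AND PROOFS =====

-- loop invariant of A's fold over range(1, j): the state is (first index of the min, last index of the max)
lemma pv_invA (arr : List Int) (j : Nat) (h1 : 1 ≤ j) (hj : j ≤ arr.length) :
    ∃ mi ma : Nat,
      (PySem.List.pyRange 1 (j : Int) 1).foldl (pvStepA arr) (0, 0) = ((mi : Int), (ma : Int)) ∧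
      mi < j ∧ ma < j ∧
      (∀ i, i < j → arr.getD i 0 ≤ arr.getD ma 0) ∧
      (∀ i, ma < i → i < j → arr.getD i 0 < arr.getD ma 0) ∧
      (∀ i, i < j → arr.getD mi 0 ≤ arr.getD i 0) ∧
      (∀ i, i < mi → arr.getD mi 0 < arr.getD i 0) := by
  induction j, h1 using Nat.le_induction with
  | base =>
      refine ⟨0, 0, by simp [PySem.List.pyRange_one_eq_nil (le_refl (1:Int))], by omega, by omega,
        ?_, ?_, ?_, ?_⟩
      · intro i hi; have : i = 0 := by omega
        subst this; exact le_refl _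
      · intro i h1 h2; omega
      · intro i hi; have : i = 0 := by omega
        subst this; exact le_refl _
      · intro i hi; omega
  | succ j h1 ih =>
      obtain ⟨mi, ma, hfold, hmi, hma, hmax, hmaxlast, hmin, hminfirst⟩ := ih (by omega)
      have hcast : ((j + 1 : Nat) : Int) = (j : Int) + 1 := by push_cast; ring
      have hsplit : PySem.List.pyRange 1 ((j:Int) + 1) 1
          = PySem.List.pyRange 1 (j : Int) 1 ++ [(j : Int)] :=
        PySem.List.pyRange_one_succ_right (by exact_mod_cast h1)
      rw [hcast, hsplit, List.foldl_append, hfold]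
      simp only [List.foldl, pvStepA, PySem.List.pyGetD_natCast]
      by_cases hM : arr.getD ma 0 ≤ arr.getD j 0
      · by_cases hm : arr.getD mi 0 > arr.getD j 0
        · refine ⟨j, j, by rw [if_pos hm, if_pos hM], by omega, by omega, ?_, ?_, ?_, ?_⟩
          · intro i hi
            rcases Nat.lt_succ_iff_lt_or_eq.mp hi with h | h
            · exact le_trans (hmax i h) hM
            · subst h; omega
          · intro i hgt hlt; omega
          · intro i hi
            rcases Nat.lt_succ_iff_lt_or_eq.mp hi with h | h
            · have := hmin i h; omega
            · subst h; omega
          · intro i hi; have := hmin i hi; omega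
        · refine ⟨mi, j, by rw [if_neg hm, if_pos hM], by omega, by omega, ?_, ?_, ?_, ?_⟩
          · intro i hi
            rcases Nat.lt_succ_iff_lt_or_eq.mp hi with h | h
            · exact le_trans (hmax i h) hM
            · subst h; omega
          · intro i hgt hlt; omega
          · intro i hi
            rcases Nat.lt_succ_iff_lt_or_eq.mp hi with h | h
            · exact hmin i h
            · subst h; omega
          · exact hminfirst
      · by_cases hm : arr.getD mi 0 > arr.getD j 0
        · refine ⟨j, ma, by rw [if_pos hm, if_neg hM], by omega, by omega, ?_, ?_, ?_, ?_⟩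
          · intro i hi
            rcases Nat.lt_succ_iff_lt_or_eq.mp hi with h | h
            · exact hmax i h
            · subst h; omega
          · intro i hgt hlt
            rcases Nat.lt_succ_iff_lt_or_eq.mp hlt with h | h
            · exact hmaxlast i hgt h
            · subst h; omega
          · intro i hi
            rcases Nat.lt_succ_iff_lt_or_eq.mp hi with h | h
            · have := hmin i h; omega
            · subst h; omega
          · intro i hi; have := hmin i hi; omega
        · refine ⟨mi, ma, by rw [if_neg hm, if_neg hM], by omega, by omega, ?_, ?_, ?_, ?_⟩
          · intro i hi
            rcases Nat.lt_succ_iff_lt_or_eq.mp hi with h | h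
            · exact hmax i h
            · subst h; omega
          · intro i hgt hlt
            rcases Nat.lt_succ_iff_lt_or_eq.mp hlt with h | h
            · exact hmaxlast i hgt h
            · subst h; omega
          · intro i hi
            rcases Nat.lt_succ_iff_lt_or_eq.mp hi with h | h
            · exact hmin i h
            · subst h; omega
          · exact hminfirst

-- index? returns the position of the first occurrence
lemma pv_index?_eq {v : Int} (p : List Int) (i : Nat) (hi : i < p.length)
    (h : p[i] = v) (hne : ∀ t (ht : t < i), p[t]'(by omega) ≠ v) :
    PySem.List.index? p v = some i := by
  rw [PySem.List.index?_eq_some_iff]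
  refine ⟨p.take i, p.drop (i + 1), ?_, by simp [List.length_take]; omega, ?_⟩
  · rw [← h, List.getElem_cons_drop, List.take_append_drop]
  · intro hmem
    obtain ⟨t, ht, hteq⟩ := List.mem_iff_getElem.mp hmem
    have htlen : t < i := by
      have := ht; simp [List.length_take] at this; omega
    have : p[t]'(by omega) = v := by
      rw [← hteq]; simp [List.getElem_take]
    exact hne t htlen this

-- the comprehension [arr[i] for i in range(n)] is arr.take n.toNat when n ≤ len(arr)
lemma pv_pfx_eq_take (arr : List Int) (k : Nat) (hk : k ≤ arr.length) :
    (PySem.List.pyRange 0 (k : Int) 1).map (fun i => PySem.List.pyGetD arr i 0) = arr.take k := by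
  apply List.ext_getElem
  · simp [PySem.List.length_pyRange_one, List.length_take]; omega
  · intro t h1 h2
    have ht : t < k := by
      have := h1; simp [PySem.List.length_pyRange_one] at this; omega
    have ht' : t < arr.length := by omega
    simp only [List.getElem_map, List.getElem_take]
    rw [PySem.List.getElem_pyRange_one]
    have : (0 : Int) + t = ((t : Nat) : Int) := by omega
    rw [this, PySem.List.pyGetD_natCast]
    simp [List.getD_eq_getElem?_getD, List.getElem?_eq_getElem ht']

theorem min_max_index_gap_spec : Claim_equal_min_max_index_gap := by
  intro arr n _ hpre
  unfold Spec_min_max_index_gap min_max_index_gap min_max_index_gap_alt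
  by_cases hn : n ≤ 1
  · simp [PySem.List.pyRange_one_eq_nil hn, hn]
  · simp only [hn, if_false]
    have hlen : n ≤ (arr.length : Int) := by
      rcases hpre with h | h
      · omega
      · exact h
    set k := n.toNat with hk
    have hnk : (k : Int) = n := by omega
    have hk2 : 2 ≤ k := by omega
    have hklen : k ≤ arr.length := by omega
    obtain ⟨mi, ma, hfold, hmi, hma, hmax, hmaxlast, hmin, hminfirst⟩ :=
      pv_invA arr k (by omega) hklen
    rw [← hnk, hfold]
    have hpfx := pv_pfx_eq_take arr k hklen
    set p := arr.take k with hp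
    have hplen : p.length = k := by simp [hp, List.length_take]; omega
    have hget : ∀ t (ht : t < k), p[t]'(by omega) = arr.getD t 0 := by
      intro t ht
      have ht' : t < arr.length := by omega
      simp [hp, List.getElem_take, List.getD_eq_getElem?_getD, List.getElem?_eq_getElem ht']
    -- max and min values
    have hpne : p ≠ [] := by
      intro h; rw [h] at hplen; simp at hplen; omega
    obtain ⟨a, t, hcons⟩ := List.exists_cons_of_ne_nil hpne
    obtain ⟨mx, hmx⟩ : ∃ mx, PySem.List.max? p (fun x => x) = some mx := by
      rw [hcons]; exact ⟨t.foldl max a, PySem.List.max?_id_cons a t⟩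
    obtain ⟨mn, hmn⟩ : ∃ mn, PySem.List.min? p (fun x => x) = some mn := by
      rw [hcons]; exact ⟨t.foldl min a, PySem.List.min?_id_cons a t⟩
    have hmxval : mx = arr.getD ma 0 := by
      have h1 : arr.getD ma 0 ≤ mx := by
        have : p[ma]'(by omega) ∈ p := List.getElem_mem _
        have := PySem.List.max?_isMax hmx _ this
        rwa [hget ma hma] at this
      have h2 : mx ≤ arr.getD ma 0 := by
        obtain ⟨t, ht, hteq⟩ := List.mem_iff_getElem.mp (PySem.List.max?_mem hmx)
        have ht' : t < k := by omega
        rw [← hteq, hget t ht']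
        exact hmax t ht'
      omega
    have hmnval : mn = arr.getD mi 0 := by
      have h1 : mn ≤ arr.getD mi 0 := by
        have : p[mi]'(by omega) ∈ p := List.getElem_mem _
        have := PySem.List.min?_isMin hmn _ this
        rwa [hget mi hmi] at this
      have h2 : arr.getD mi 0 ≤ mn := by
        obtain ⟨t, ht, hteq⟩ := List.mem_iff_getElem.mp (PySem.List.min?_mem hmn)
        have ht' : t < k := by omega
        rw [← hteq, hget t ht']
        exact hmin t ht'
      omega
    -- first occurrence of the min
    have hidxmin : PySem.List.index? p mn = some mi := by
      apply pv_index?_eq p mi (by omega)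
      · rw [hget mi hmi, hmnval]
      · intro t ht h
        rw [hget t (by omega), hmnval] at h
        have := hminfirst t ht
        omega
    -- first occurrence of the max in the reversed prefix
    have hidxmax : PySem.List.index? p.reverse mx = some (k - 1 - ma) := by
      have hrlen : p.reverse.length = k := by simp [hplen]
      have hrget : ∀ t (ht : t < k), p.reverse[t]'(by omega) = arr.getD (k - 1 - t) 0 := by
        intro t ht
        rw [List.getElem_reverse]
        simp only [hplen]
        exact hget (k - 1 - t) (by omega)
      apply pv_index?_eq p.reverse (k - 1 - ma) (by omega)
      · rw [hrget (k - 1 - ma) (by omega)]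
        have : k - 1 - (k - 1 - ma) = ma := by omega
        rw [this, hmxval]
      · intro t ht h
        rw [hrget t (by omega), hmxval] at h
        have := hmaxlast (k - 1 - t) (by omega) (by omega)
        omega
    rw [hpfx, hmx, hmn]
    simp only [hidxmin, hidxmax, Option.getD_some]
    have : ((k - 1 - ma : Nat) : Int) = (k : Int) - 1 - (ma : Int) := by omega
    rw [this]
    ring
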